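-- pv_equiv track=rewrite | github.com/NeptuneHub/AudioMuse-AI | tests/unit/test_app_chat.py | _apply_diversity_logic
-- ===== SOURCE A (Python) =====
-- def _apply_diversity_logic(songs, max_per_artist, target_count):
--     """Helper to apply diversity logic (extracted from app_chat.py)."""
--     artist_song_counts = {}
--     diverse_list = []
--     overflow_pool = []
--
--     for song in songs:
--         artist = song.get('artist', 'Unknown')
--         artist_song_counts[artist] = artist_song_counts.get(artist, 0) + 1
--
--         if artist_song_counts[artist] <= max_per_artist:
--             diverse_list.append(song)
--         else:
--             overflow_pool.append(song)
--
--     # Backfill if needed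
--     if len(diverse_list) < target_count and overflow_pool:
--         diverse_artist_counts = {}
--         for song in diverse_list:
--             artist = song.get('artist', 'Unknown')
--             diverse_artist_counts[artist] = diverse_artist_counts.get(artist, 0) + 1
--
--         def artist_rarity(song):
--             artist = song.get('artist', 'Unknown')
--             return diverse_artist_counts.get(artist, 0)
--
--         overflow_sorted = sorted(overflow_pool, key=artist_rarity)
--         backfill_needed = target_count - len(diverse_list)
--         backfill = overflow_sorted[:backfill_needed]
--         diverse_list.extend(backfill)
--
--     return diverse_list
-- ===== SOURCE B (Python) =====
-- def _apply_diversity_logic(songs, max_per_artist, target_count):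
--     """Limit songs per artist, then backfill from overflow in original order."""
--     counts = {}
--     flags = []
--     for song in songs:
--         artist = song.get('artist', 'Unknown')
--         seen = counts.get(artist, 0)
--         counts[artist] = seen + 1
--         flags.append(seen < max_per_artist)
--     diverse = [s for s, f in zip(songs, flags) if f]
--     overflow = [s for s, f in zip(songs, flags) if not f]
--     if len(diverse) >= target_count or not overflow:
--         return diverse
--     return diverse + overflow[:target_count - len(diverse)]
-- ===== Notes on version B (the rewrite author's own statement) =====
-- stated objective: simpler
-- what changed: B replaces A's interleaved dict/partition loop by a keep-flags pass plus zip-filter partitions, and drops A's second per-artist counting pass and the sorted() call entirely (every overflow artist already has exactly max(max_per_artist,0) songs in the diverse list, so the rarity key is constant and the stable sort is the identity), backfilling with a plain slice of the overflow pool.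
import Mathlib
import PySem

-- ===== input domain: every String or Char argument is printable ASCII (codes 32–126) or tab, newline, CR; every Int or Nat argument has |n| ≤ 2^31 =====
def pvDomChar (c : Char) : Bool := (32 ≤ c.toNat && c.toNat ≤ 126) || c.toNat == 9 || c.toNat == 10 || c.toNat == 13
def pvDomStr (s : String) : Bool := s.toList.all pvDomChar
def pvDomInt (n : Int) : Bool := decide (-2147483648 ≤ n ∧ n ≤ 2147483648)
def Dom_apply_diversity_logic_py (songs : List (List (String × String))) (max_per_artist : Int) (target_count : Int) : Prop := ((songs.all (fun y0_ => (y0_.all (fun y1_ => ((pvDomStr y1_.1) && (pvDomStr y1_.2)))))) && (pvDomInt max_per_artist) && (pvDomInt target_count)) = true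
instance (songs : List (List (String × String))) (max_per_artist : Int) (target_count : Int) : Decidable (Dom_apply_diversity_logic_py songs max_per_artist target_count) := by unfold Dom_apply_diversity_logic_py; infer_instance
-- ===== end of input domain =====

-- B is simpler: a keep-flags pass plus zip-filter partitions replace A's interleaved
-- dict/partition loop, and A's second counting pass and sorted() call (whose key is
-- constant on the overflow pool, so the stable sort is the identity) are dropped;
-- the backfill is a plain slice of the overflow pool.

-- ===== PORT A =====
-- song.get('artist', 'Unknown')
def pvArtist (song : List (String × String)) : String :=
  (PySem.Dict.mk song).getD "artist" "Unknown"

def apply_diversity_logic_py (songs : List (List (String × String))) (max_per_artist : Int) (target_count : Int) : List (List (String × String)) :=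
  let st := songs.foldl
    (fun (st : PySem.Dict String Int × List (List (String × String)) × List (List (String × String))) song =>
      let artist := pvArtist song
      let counts := st.1.insert artist (st.1.getD artist 0 + 1)
      if counts.getD artist 0 ≤ max_per_artist then
        (counts, st.2.1 ++ [song], st.2.2)
      else
        (counts, st.2.1, st.2.2 ++ [song]))
    (PySem.Dict.empty, [], [])
  let diverse_list := st.2.1
  let overflow_pool := st.2.2
  if (diverse_list.length : Int) < target_count ∧ overflow_pool ≠ [] then
    let diverse_artist_counts := diverse_list.foldl
      (fun (d : PySem.Dict String Int) song => d.insert (pvArtist song) (d.getD (pvArtist song) 0 + 1))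
      PySem.Dict.empty
    let overflow_sorted := PySem.List.sorted overflow_pool (fun song => diverse_artist_counts.getD (pvArtist song) 0) false
    let backfill := PySem.List.slice overflow_sorted none (some (target_count - (diverse_list.length : Int)))
    diverse_list ++ backfill
  else
    diverse_list

-- ===== PORT B =====
def apply_diversity_logic_py_alt (songs : List (List (String × String))) (max_per_artist : Int) (target_count : Int) : List (List (String × String)) :=
  -- pass 1: per-artist running counts → one keep flag per song
  let st := songs.foldl
    (fun (st : PySem.Dict String Int × List Bool) song =>
      let artist := pvArtist song
      let seen := st.1.getD artist 0
      (st.1.insert artist (seen + 1), st.2 ++ [decide (seen < max_per_artist)]))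
    (PySem.Dict.empty, [])
  let flags := st.2
  -- pass 2: partition by the flags (the two list comprehensions over zip)
  let diverse := (songs.zip flags).filterMap (fun p => if p.2 then some p.1 else none)
  let overflow := (songs.zip flags).filterMap (fun p => if p.2 then none else some p.1)
  if target_count ≤ (diverse.length : Int) ∨ overflow = [] then diverse
  else diverse ++ PySem.List.slice overflow none (some (target_count - (diverse.length : Int)))

-- ===== PRECONDITION & SPEC =====
def Spec_apply_diversity_logic_py (songs : List (List (String × String))) (max_per_artist : Int) (target_count : Int) (out : List (List (String × String))) : Prop := out = apply_diversity_logic_py_alt songs max_per_artist target_count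
instance (songs : List (List (String × String))) (max_per_artist : Int) (target_count : Int) (out : List (List (String × String))) : Decidable (Spec_apply_diversity_logic_py songs max_per_artist target_count out) := by unfold Spec_apply_diversity_logic_py; infer_instance

-- ===== CLAIM (what is proved, stated in full; the proofs are below) =====
def Claim_equal_apply_diversity_logic_py : Prop := ∀ (songs : List (List (String × String))) (max_per_artist : Int) (target_count : Int), Dom_apply_diversity_logic_py songs max_per_artist target_count → Spec_apply_diversity_logic_py songs max_per_artist target_count (apply_diversity_logic_py songs max_per_artist target_count)

-- ===== LEMMAS AND PROOFS =====

-- A's first-pass loop body, named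
def pvStep (m : Int)
    (st : PySem.Dict String Int × List (List (String × String)) × List (List (String × String)))
    (song : List (String × String)) :
    PySem.Dict String Int × List (List (String × String)) × List (List (String × String)) :=
  let a := pvArtist song
  let c := st.1.getD a 0 + 1
  if c ≤ m then (st.1.insert a c, st.2.1 ++ [song], st.2.2)
  else (st.1.insert a c, st.2.1, st.2.2 ++ [song])

-- B's flags-pass loop body, named
def pvStepB (m : Int)
    (st : PySem.Dict String Int × List Bool) (song : List (String × String)) :
    PySem.Dict String Int × List Bool :=
  let a := pvArtist song
  let seen := st.1.getD a 0
  (st.1.insert a (seen + 1), st.2 ++ [decide (seen < m)])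

theorem pvStepA_eq (m : Int) :
    (fun (st : PySem.Dict String Int × List (List (String × String)) × List (List (String × String))) song =>
      let artist := pvArtist song
      let counts := st.1.insert artist (st.1.getD artist 0 + 1)
      if counts.getD artist 0 ≤ m then
        (counts, st.2.1 ++ [song], st.2.2)
      else
        (counts, st.2.1, st.2.2 ++ [song])) = pvStep m := by
  funext st song
  simp [pvStep, PySem.Dict.getD_insert_self]

theorem pvStepB_eq (m : Int) :
    (fun (st : PySem.Dict String Int × List Bool) song =>
      let artist := pvArtist song
      let seen := st.1.getD artist 0
      (st.1.insert artist (seen + 1), st.2 ++ [decide (seen < m)])) = pvStepB m := rfl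

-- accumulator decomposition of the two folds
theorem pvFoldA_acc (m : Int) (l : List (List (String × String)))
    (d : PySem.Dict String Int) (dv ov : List (List (String × String))) :
    l.foldl (pvStep m) (d, dv, ov)
      = ((l.foldl (pvStep m) (d, [], [])).1,
         dv ++ (l.foldl (pvStep m) (d, [], [])).2.1,
         ov ++ (l.foldl (pvStep m) (d, [], [])).2.2) := by
  induction l generalizing d dv ov with
  | nil => simp
  | cons s rest ih =>
    simp only [List.foldl_cons, pvStep, List.nil_append]
    by_cases hc : d.getD (pvArtist s) 0 + 1 ≤ m
    · simp only [hc, if_pos]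
      rw [ih _ (dv ++ [s]) ov, ih _ [s] []]
      simp
    · simp only [hc, if_false]
      rw [ih _ dv (ov ++ [s]), ih _ [] [s]]
      simp

theorem pvFoldB_acc (m : Int) (l : List (List (String × String)))
    (d : PySem.Dict String Int) (fl : List Bool) :
    l.foldl (pvStepB m) (d, fl)
      = ((l.foldl (pvStepB m) (d, [])).1, fl ++ (l.foldl (pvStepB m) (d, [])).2) := by
  induction l generalizing d fl with
  | nil => simp
  | cons s rest ih =>
    simp only [List.foldl_cons, pvStepB, List.nil_append]
    rw [ih _ (fl ++ [decide (d.getD (pvArtist s) 0 < m)]),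
        ih _ [decide (d.getD (pvArtist s) 0 < m)]]
    simp

-- the relation between A's first pass and B's flags pass
theorem pvRel (m : Int) (l : List (List (String × String))) (d : PySem.Dict String Int) :
    (l.foldl (pvStep m) (d, [], [])).1 = (l.foldl (pvStepB m) (d, [])).1
    ∧ (l.foldl (pvStep m) (d, [], [])).2.1
        = (l.zip (l.foldl (pvStepB m) (d, [])).2).filterMap (fun p => if p.2 then some p.1 else none)
    ∧ (l.foldl (pvStep m) (d, [], [])).2.2
        = (l.zip (l.foldl (pvStepB m) (d, [])).2).filterMap (fun p => if p.2 then none else some p.1) := by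
  induction l generalizing d with
  | nil => simp
  | cons s rest ih =>
    have hA : (s :: rest).foldl (pvStep m) (d, [], [])
        = rest.foldl (pvStep m) (pvStep m (d, [], []) s) := by simp
    have hB : (s :: rest).foldl (pvStepB m) (d, [])
        = rest.foldl (pvStepB m) (pvStepB m (d, []) s) := by simp
    obtain ⟨ih1, ih2, ih3⟩ := ih (d.insert (pvArtist s) (d.getD (pvArtist s) 0 + 1))
    by_cases hc : d.getD (pvArtist s) 0 + 1 ≤ m
    · have hf : decide (d.getD (pvArtist s) 0 < m) = true := by
        simp; omega
      rw [hA, hB]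
      simp only [pvStep, pvStepB, hc, if_pos, List.nil_append]
      rw [pvFoldA_acc m rest _ [s] [], pvFoldB_acc m rest _ [decide (d.getD (pvArtist s) 0 < m)]]
      refine ⟨ih1, ?_, ?_⟩
      · simp only [List.cons_append, List.nil_append, List.zip_cons_cons, List.filterMap_cons, hf]
        rw [ih2]
        simp
      · simp only [List.nil_append, List.cons_append, List.zip_cons_cons, List.filterMap_cons, hf]
        rw [ih3]
        simp
    · have hf : decide (d.getD (pvArtist s) 0 < m) = false := by
        simp; omega
      rw [hA, hB]
      simp only [pvStep, pvStepB, hc, if_false, List.nil_append]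
      rw [pvFoldA_acc m rest _ [] [s], pvFoldB_acc m rest _ [decide (d.getD (pvArtist s) 0 < m)]]
      refine ⟨ih1, ?_, ?_⟩
      · simp only [List.nil_append, List.cons_append, List.zip_cons_cons, List.filterMap_cons, hf]
        rw [ih2]
        simp
      · simp only [List.nil_append, List.cons_append, List.zip_cons_cons, List.filterMap_cons, hf]
        rw [ih3]
        simp

-- loop invariant of A's first pass: the dict counts all songs seen per artist, the
-- diverse list holds min(total, max(max_per_artist,0)) of them, and every overflow
-- song's artist has strictly more than max_per_artist songs counted
def pvInv (m : Int)
    (st : PySem.Dict String Int × List (List (String × String)) × List (List (String × String))) : Prop :=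
  (∀ a : String, st.1.getD a 0 = (((st.2.1 ++ st.2.2).map pvArtist).count a : Int))
  ∧ (∀ a : String, ((st.2.1.map pvArtist).count a : Int) = min (st.1.getD a 0) (m ⊔ 0))
  ∧ (∀ s ∈ st.2.2, m < st.1.getD (pvArtist s) 0)

theorem pvInv_step (m : Int) (st) (song : List (String × String)) (h : pvInv m st) :
    pvInv m (pvStep m st song) := by
  obtain ⟨d, dv, ov⟩ := st
  obtain ⟨h1, h2, h3⟩ := h
  simp only [pvInv] at h1 h2 h3 ⊢
  simp only [pvStep]
  by_cases hc : d.getD (pvArtist song) 0 + 1 ≤ m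
  · simp only [hc, if_pos]
    refine ⟨?_, ?_, ?_⟩
    · intro b
      rw [PySem.Dict.getD_insert]
      split_ifs with hb
      · rw [hb]
        have h1' := h1 (pvArtist song)
        simp only [List.map_append, List.map_cons, List.map_nil, List.count_append,
          List.count_cons, List.count_nil, beq_self_eq_true, if_true] at h1' ⊢
        push_cast at h1' ⊢
        omega
      · have hab : (pvArtist song == b) = false := beq_eq_false_iff_ne.mpr (fun h => hb h.symm)
        have h1' := h1 b
        simp only [List.map_append, List.map_cons, List.map_nil, List.count_append,
          List.count_cons, List.count_nil, hab] at h1' ⊢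
        push_cast at h1' ⊢
        omega
    · intro b
      rw [PySem.Dict.getD_insert]
      split_ifs with hb
      · rw [hb]
        have h2' := h2 (pvArtist song)
        simp only [List.map_append, List.map_cons, List.map_nil, List.count_append,
          List.count_cons, List.count_nil, beq_self_eq_true, if_true] at h2' ⊢
        push_cast at h2' ⊢
        omega
      · have hab : (pvArtist song == b) = false := beq_eq_false_iff_ne.mpr (fun h => hb h.symm)
        have h2' := h2 b
        simp only [List.map_append, List.map_cons, List.map_nil, List.count_append,
          List.count_cons, List.count_nil, hab] at h2' ⊢
        push_cast at h2' ⊢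
        omega
    · intro s hs
      rw [PySem.Dict.getD_insert]
      split_ifs with hb
      · have h3' := h3 s hs; rw [hb] at h3'; omega
      · exact h3 s hs
  · simp only [hc, if_false]
    refine ⟨?_, ?_, ?_⟩
    · intro b
      rw [PySem.Dict.getD_insert]
      split_ifs with hb
      · rw [hb]
        have h1' := h1 (pvArtist song)
        simp only [List.map_append, List.map_cons, List.map_nil, List.count_append,
          List.count_cons, List.count_nil, beq_self_eq_true, if_true] at h1' ⊢
        push_cast at h1' ⊢
        omega
      · have hab : (pvArtist song == b) = false := beq_eq_false_iff_ne.mpr (fun h => hb h.symm)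
        have h1' := h1 b
        simp only [List.map_append, List.map_cons, List.map_nil, List.count_append,
          List.count_cons, List.count_nil, hab] at h1' ⊢
        push_cast at h1' ⊢
        omega
    · intro b
      rw [PySem.Dict.getD_insert]
      split_ifs with hb
      · rw [hb]
        have h2' := h2 (pvArtist song)
        have h1' := h1 (pvArtist song)
        simp only [List.map_append, List.count_append] at h1'
        push_cast at h1' h2' ⊢
        omega
      · exact h2 b
    · intro s hs
      rw [PySem.Dict.getD_insert]
      rcases List.mem_append.mp hs with hs' | hs'
      · split_ifs with hb
        · have h3' := h3 s hs'; rw [hb] at h3'; omega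
        · exact h3 s hs'
      · have hss : s = song := by simpa using hs'
        rw [hss]
        split_ifs with hb
        · omega
        · exact (hb rfl).elim

theorem pvInv_foldl (m : Int) (songs : List (List (String × String))) (st) (h : pvInv m st) :
    pvInv m (songs.foldl (pvStep m) st) := by
  induction songs generalizing st with
  | nil => exact h
  | cons s rest ih => exact ih _ (pvInv_step m st s h)

theorem pvInv_init (m : Int) : pvInv m ((PySem.Dict.empty : PySem.Dict String Int), ([] : List (List (String × String))), ([] : List (List (String × String)))) := by
  refine ⟨?_, ?_, ?_⟩
  · intro a; simp [PySem.Dict.getD_empty]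
  · intro a; simp [PySem.Dict.getD_empty]
  · intro s hs; simp at hs

-- the second counting pass of A computes the per-artist count of the diverse list
theorem pvDiverseCounts (dv : List (List (String × String))) (a : String) :
    (dv.foldl (fun (d : PySem.Dict String Int) song => d.insert (pvArtist song) (d.getD (pvArtist song) 0 + 1)) PySem.Dict.empty).getD a 0
      = ((dv.map pvArtist).count a : Int) := by
  rw [← List.foldl_map (f := pvArtist) (g := fun (d : PySem.Dict String Int) x => d.insert x (d.getD x 0 + 1))]
  rw [PySem.Dict.getD_foldl_insert_add_one]
  simp [PySem.Dict.getD_empty]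

-- ===== VERDICT (by name: the statement is the Claim_ definition above) =====
theorem apply_diversity_logic_py_spec : Claim_equal_apply_diversity_logic_py := by
  unfold Claim_equal_apply_diversity_logic_py
  intro songs m t _
  unfold Spec_apply_diversity_logic_py apply_diversity_logic_py apply_diversity_logic_py_alt
  rw [pvStepA_eq, pvStepB_eq]
  obtain ⟨hrel1, hrel2, hrel3⟩ := pvRel m songs PySem.Dict.empty
  set sa := songs.foldl (pvStep m) (PySem.Dict.empty, [], []) with hsa
  set sb := songs.foldl (pvStepB m) (PySem.Dict.empty, []) with hsb
  have hinv : pvInv m sa := by rw [hsa]; exact pvInv_foldl m songs _ (pvInv_init m)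
  obtain ⟨h1, h2, h3⟩ := hinv
  set dv := sa.2.1
  set ov := sa.2.2
  simp only [← hrel2, ← hrel3]
  by_cases hle : t ≤ (dv.length : Int)
  · have hno : ¬ ((dv.length : Int) < t ∧ ov ≠ []) := by rintro ⟨h, _⟩; omega
    rw [if_neg hno, if_pos (Or.inl hle)]
  · rw [not_le] at hle
    by_cases hov : ov = []
    · have hno : ¬ ((dv.length : Int) < t ∧ ov ≠ []) := by rintro ⟨_, h⟩; exact h hov
      rw [if_neg hno, if_pos (Or.inr hov)]
    · have hno : ¬ (t ≤ (dv.length : Int) ∨ ov = []) := by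
        rintro (h | h); omega; exact hov h
      rw [if_pos ⟨hle, hov⟩, if_neg hno]
      -- the sort key is constant (= max(max_per_artist, 0)) on the overflow pool
      have hkey : ∀ s ∈ ov,
          (dv.foldl (fun (d : PySem.Dict String Int) song => d.insert (pvArtist song) (d.getD (pvArtist song) 0 + 1)) PySem.Dict.empty).getD (pvArtist s) 0 = m ⊔ 0 := by
        intro s hs
        rw [pvDiverseCounts]
        have hc := h2 (pvArtist s)
        have hgt := h3 s hs
        have htot := h1 (pvArtist s)
        simp only [List.map_append, List.count_append] at htot
        push_cast at hc htot ⊢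
        omega
      have hsorted : PySem.List.sorted ov
          (fun song => (dv.foldl (fun (d : PySem.Dict String Int) song => d.insert (pvArtist song) (d.getD (pvArtist song) 0 + 1)) PySem.Dict.empty).getD (pvArtist song) 0) false = ov := by
        apply PySem.List.sorted_eq_self_of_pairwise
        apply List.pairwise_of_forall_mem_list
        intro x hx y hy
        rw [hkey x hx, hkey y hy]
      rw [hsorted]
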